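-- pv_equiv track=rewrite | github.com/SatoryKono/ChEMBL_data_acquisition | library/target_postprocessing.py | _pipe_merge
-- ===== SOURCE A (Python) =====
-- from typing import Iterable
--
-- def _pipe_merge(values: Iterable[str | float | None]) -> str:
--     """Return a ``"|"``-separated string of unique tokens.
--
--     Parameters
--     ----------
--     values:
--         Iterable of pipe-delimited strings. ``None`` and empty strings are
--         ignored.
--
--     Returns
--     -------
--     str
--         Unique tokens joined by ``"|"`` in their first appearance order.
--     """
--
--     tokens: list[str] = []
--     seen: set[str] = set()
--     for value in values:
--         if isinstance(value, str) and value: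
--             for part in (p.strip() for p in value.split("|") if p.strip()):
--                 if part not in seen:
--                     seen.add(part)
--                     tokens.append(part)
--     return "|".join(tokens)
-- ===== SOURCE B (Python) =====
-- def _pipe_merge(values):
--     """Flatten all pipe-delimited tokens into one list, then deduplicate by
--     repeatedly taking the first remaining token and filtering every later
--     occurrence of it out of the remainder (no 'seen' set is maintained)."""
--     parts = [
--         p.strip()
--         for v in values
--         if isinstance(v, str) and v
--         for p in v.split("|")
--         if p.strip()
--     ]
--     out = []
--     while parts:
--         head = parts[0]
--         out.append(head)
--         parts = [x for x in parts[1:] if x != head]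
--     return "|".join(out)
-- ===== Notes on version B (the rewrite author's own statement) =====
-- stated objective: alternative
-- what changed: Replaced A's single pass that maintains two parallel structures (a tokens list plus a seen set consulted before each append) by a two-stage decomposition: flatten all stripped tokens into one list, then deduplicate by repeatedly taking the first remaining token and filtering its later occurrences out of the remainder, so no membership structure is carried at all.
import Mathlib
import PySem

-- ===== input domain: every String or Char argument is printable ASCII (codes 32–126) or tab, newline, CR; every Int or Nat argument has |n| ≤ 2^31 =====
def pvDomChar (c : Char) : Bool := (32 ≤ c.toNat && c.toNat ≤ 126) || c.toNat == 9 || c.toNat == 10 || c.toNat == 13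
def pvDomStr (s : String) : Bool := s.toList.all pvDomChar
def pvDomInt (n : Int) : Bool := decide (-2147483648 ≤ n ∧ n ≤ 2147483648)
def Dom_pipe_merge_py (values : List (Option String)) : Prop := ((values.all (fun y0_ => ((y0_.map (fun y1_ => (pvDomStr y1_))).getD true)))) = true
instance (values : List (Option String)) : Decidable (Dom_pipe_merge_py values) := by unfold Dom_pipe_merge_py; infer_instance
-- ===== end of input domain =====

-- B replaces A's single pass (tokens list + seen set with a membership branch) by
-- flatten-then-dedup-by-filtering: repeatedly take the first remaining token and filter
-- its later occurrences out of the remainder; same return value, no membership structure.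

-- ===== PORT A =====
-- inner loop body: for part in (p.strip() for p in value.split("|") if p.strip()): if part not in seen: …
def pipeMergeStep (st : List String × PySem.Set String) (p : String) : List String × PySem.Set String :=
  let t := PySem.Str.strip p
  if t ≠ "" then
    (if PySem.Set.contains st.2 t then st else (st.1 ++ [t], PySem.Set.add st.2 t))
  else st

-- outer loop body: if isinstance(value, str) and value: …
def pipeMergeOuter (st : List String × PySem.Set String) (v : Option String) : List String × PySem.Set String :=
  match v with
  | none => st
  | some s => if s ≠ "" then ((PySem.Str.split? s "|").getD []).foldl pipeMergeStep st else st

def pipe_merge_py (values : List (Option String)) : String :=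
  let st := values.foldl pipeMergeOuter ([], PySem.Set.empty)
  PySem.Str.join "|" st.1

-- ===== PORT B =====
-- tokens contributed by one value: split on '|', strip, drop empties
def pipeParts (v : Option String) : List String :=
  match v with
  | none => []
  | some s => if s ≠ "" then (((PySem.Str.split? s "|").getD []).map PySem.Str.strip).filter (fun p => p ≠ "") else []

-- Source B's dedup loop: take the first remaining token, filter its duplicates out of the rest
def altDedup : List String → List String
  | [] => []
  | h :: t => h :: altDedup (t.filter (fun x => x ≠ h))
termination_by xs => xs.length
decreasing_by
  simp
  exact le_trans (List.length_filter_le _ _) (le_of_eq List.length_attach)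

def pipe_merge_py_alt (values : List (Option String)) : String :=
  PySem.Str.join "|" (altDedup (values.flatMap pipeParts))

-- ===== PRECONDITION & SPEC =====
def Spec_pipe_merge_py (values : List (Option String)) (out : String) : Prop := out = pipe_merge_py_alt values
instance (values : List (Option String)) (out : String) : Decidable (Spec_pipe_merge_py values out) := by unfold Spec_pipe_merge_py; infer_instance

-- ===== CLAIM (what is proved, stated in full; the proofs are below) =====
def Claim_equal_pipe_merge_py : Prop := ∀ (values : List (Option String)), Dom_pipe_merge_py values → Spec_pipe_merge_py values (pipe_merge_py values)

-- ===== LEMMAS AND PROOFS =====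

-- A's inner loop on a diagonal state (tokens = seen) acts as Set.update with the filtered stripped parts
lemma inner_eq (ps : List String) (s : PySem.Set String) :
    ps.foldl pipeMergeStep (s, s)
      = (PySem.Set.update s ((ps.map PySem.Str.strip).filter (fun p => p ≠ "")),
         PySem.Set.update s ((ps.map PySem.Str.strip).filter (fun p => p ≠ ""))) := by
  induction ps generalizing s with
  | nil => simp [PySem.Set.update]
  | cons p ps ih =>
    simp only [List.foldl_cons, List.map_cons, List.filter_cons]
    by_cases h : PySem.Str.strip p = ""
    · simpa [pipeMergeStep, h] using ih s
    · have hstep : pipeMergeStep (s, s) p = (PySem.Set.add s (PySem.Str.strip p), PySem.Set.add s (PySem.Str.strip p)) := by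
        simp only [pipeMergeStep, PySem.Set.add]
        split_ifs with hc <;> simp_all
      rw [hstep, ih]
      simp [h, PySem.Set.update]

lemma outer_eq (values : List (Option String)) (s : PySem.Set String) :
    values.foldl pipeMergeOuter (s, s)
      = (PySem.Set.update s (values.flatMap pipeParts),
         PySem.Set.update s (values.flatMap pipeParts)) := by
  induction values generalizing s with
  | nil => simp [PySem.Set.update]
  | cons v vs ih =>
    simp only [List.foldl_cons, List.flatMap_cons]
    have hstep : pipeMergeOuter (s, s) v
        = (PySem.Set.update s (pipeParts v), PySem.Set.update s (pipeParts v)) := by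
      match v with
      | none => simp [pipeMergeOuter, pipeParts, PySem.Set.update]
      | some str =>
        by_cases h : str = ""
        · simp [pipeMergeOuter, pipeParts, h, PySem.Set.update]
        · simpa [pipeMergeOuter, pipeParts, h] using inner_eq ((PySem.Str.split? str "|").getD []) s
    rw [hstep, ih]
    simp [PySem.Set.update]

-- Source B's dedup unfolded (equation lemmas for the well-founded definition)
lemma altDedup_nil : altDedup [] = [] := by rw [altDedup]

lemma altDedup_cons (h : String) (t : List String) :
    altDedup (h :: t) = h :: altDedup (t.filter (fun x => x ≠ h)) := by rw [altDedup]

-- Set.update with seen-filtering is B's filter-the-tail recursion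
lemma update_eq_altDedup (xs : List String) (s : PySem.Set String) :
    PySem.Set.update s xs = s ++ altDedup (xs.filter (fun x => !(PySem.Set.contains s x))) := by
  induction xs generalizing s with
  | nil => simp [PySem.Set.update, altDedup_nil]
  | cons x xs ih =>
    have hcont : PySem.Set.contains s x = decide (x ∈ s) := by
      simp [PySem.Set.contains, List.contains_eq_mem]
    by_cases hx : x ∈ s
    · have hadd : PySem.Set.add s x = s := by simp [PySem.Set.add, hx]
      calc PySem.Set.update s (x :: xs) = PySem.Set.update s xs := by
            simp [PySem.Set.update, hadd]
        _ = s ++ altDedup (xs.filter (fun y => !(PySem.Set.contains s y))) := ih s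
        _ = s ++ altDedup ((x :: xs).filter (fun y => !(PySem.Set.contains s y))) := by
            rw [List.filter_cons]; simp [hx]
    · have hadd : PySem.Set.add s x = s ++ [x] := by simp [PySem.Set.add, hx]
      have hfilt : xs.filter (fun y => !(PySem.Set.contains (s ++ [x]) y))
          = (xs.filter (fun y => !(PySem.Set.contains s y))).filter (fun y => y ≠ x) := by
        rw [List.filter_filter]
        apply List.filter_congr
        intro y _
        simp only [PySem.Set.contains, List.contains_eq_mem, List.mem_append, List.mem_singleton]
        by_cases h1 : y ∈ s <;> by_cases h2 : y = x <;> simp [h1, h2]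
      calc PySem.Set.update s (x :: xs) = PySem.Set.update (s ++ [x]) xs := by
            simp [PySem.Set.update, hadd]
        _ = (s ++ [x]) ++ altDedup (xs.filter (fun y => !(PySem.Set.contains (s ++ [x]) y))) := ih _
        _ = s ++ (x :: altDedup ((xs.filter (fun y => !(PySem.Set.contains s y))).filter (fun y => y ≠ x))) := by
            rw [hfilt]; simp
        _ = s ++ altDedup ((x :: xs).filter (fun y => !(PySem.Set.contains s y))) := by
            have hc : (!(PySem.Set.contains s x)) = true := by simp [hx]
            rw [List.filter_cons, if_pos hc, altDedup_cons]

-- ===== VERDICT (by name: the statement is the Claim_ definition above) =====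
theorem pipe_merge_py_spec : Claim_equal_pipe_merge_py := by
  intro values _
  unfold Spec_pipe_merge_py pipe_merge_py pipe_merge_py_alt
  rw [show (PySem.Set.empty : PySem.Set String) = [] from rfl, outer_eq]
  have h := update_eq_altDedup (values.flatMap pipeParts) []
  have hp : (fun x => !(PySem.Set.contains ([] : PySem.Set String) x)) = fun _ : String => true := by
    funext y; simp [PySem.Set.contains]
  rw [hp, List.filter_true, List.nil_append] at h
  rw [h]
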